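-- pv_equiv track=rewrite | github.com/Tek4to/pythonPyQT | main.py | range_sort
-- ===== SOURCE A (Python) =====
-- def range_sort(dict):
--     range_sorted_dict = {}
--     out = {}
--     sorted_tuples = sorted(dict.items(), key=lambda item: (item[1]), reverse=True)
--     sorted_dict = {k + 1: v for k, v in sorted_tuples}
--     i = 1
--     for k, v in sorted_dict.items():
--         out.setdefault(v, []).append(k)
--     for k, v in out.items():
--         for vv in v:
--             range_sorted_dict[vv] = i
--         i += 1
--     return range_sorted_dict
-- ===== SOURCE B (Python) =====
-- def range_sort(dict):
--     result = {}
--     pending = list(dict.items())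
--     rank = 1
--     while pending:
--         top = max(v for _, v in pending)
--         result.update((k + 1, rank) for k, v in pending if v == top)
--         pending = [(k, v) for k, v in pending if v != top]
--         rank += 1
--     return result
-- ===== Notes on version B (the rewrite author's own statement) =====
-- stated objective: alternative
-- what changed: Replaces A's sort-then-group-then-rank pipeline (stable sort of all items, grouping keys into per-value lists, nested loops assigning ranks) by a selection-style loop with no sorting at all: repeatedly extract the current maximum value, emit rank for all keys carrying it, and drop them from the pending list.
import Mathlib
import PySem

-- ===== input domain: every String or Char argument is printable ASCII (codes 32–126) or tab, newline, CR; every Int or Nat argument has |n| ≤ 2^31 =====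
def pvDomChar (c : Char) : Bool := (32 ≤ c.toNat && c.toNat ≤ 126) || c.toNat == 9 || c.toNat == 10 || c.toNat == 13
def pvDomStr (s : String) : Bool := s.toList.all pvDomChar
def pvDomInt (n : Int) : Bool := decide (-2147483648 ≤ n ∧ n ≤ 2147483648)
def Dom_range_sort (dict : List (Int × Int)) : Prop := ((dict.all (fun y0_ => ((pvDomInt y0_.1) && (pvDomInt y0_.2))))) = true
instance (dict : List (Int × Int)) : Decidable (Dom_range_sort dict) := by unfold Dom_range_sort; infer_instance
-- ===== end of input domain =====

-- B replaces A's sort-then-group-then-rank pipeline by a selection loop with no sorting: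
-- repeatedly extract the current maximum value, emit that rank for all keys carrying it,
-- and drop them from the pending list (alternative algorithm, similar cost).

-- ===== PORT A =====
def range_sort (dict : List (Int × Int)) : List (Int × Int) :=
  let sorted_tuples := PySem.List.sorted dict (fun item => item.2) true
  let sorted_dict : PySem.Dict Int Int :=
    sorted_tuples.foldl (fun d kv => d.insert (kv.1 + 1) kv.2) PySem.Dict.empty
  -- out.setdefault(v, []).append(k) appends k to the list stored at v (creating [] first):
  -- exactly out[v] = out.get(v, []) + [k], i.e. Dict.modify
  let out : PySem.Dict Int (List Int) :=
    sorted_dict.items.foldl (fun o kv => o.modify kv.2 [] (fun l => l ++ [kv.1])) PySem.Dict.empty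
  let fin := out.items.foldl
    (fun (acc : PySem.Dict Int Int × Int) g =>
      (g.2.foldl (fun d vv => d.insert vv acc.2) acc.1, acc.2 + 1))
    (PySem.Dict.empty, 1)
  fin.1.items

-- ===== PORT B =====
-- termination measure for the while loop: the pending list loses at least its max element
theorem pvFilterNeLt (p : Int × Int) (t : List (Int × Int)) :
    ((p :: t).filter (fun q => q.2 != (t.map (fun q => q.2)).foldl max p.2)).length
      < (p :: t).length := by
  rw [List.length_filter_lt_length_iff_exists]
  rcases PySem.List.foldl_max_mem (t.map (fun q => q.2)) p.2 with h | h
  · exact ⟨p, by simp, by simp [h]⟩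
  · obtain ⟨q, hq, hqe⟩ := List.mem_map.mp h
    exact ⟨q, by simp [hq], by simp [hqe]⟩

-- the while loop of B: 'top = max(v for _, v in pending)' is the running max (PySem.List.max?_id_cons);
-- 'result.update(…)' inserts the pairs one by one; the rebuilt 'pending' is the filter
def pvBLoop : List (Int × Int) → PySem.Dict Int Int → Int → PySem.Dict Int Int
  | [], out, _ => out
  | p :: t, out, rank =>
    let top := (t.map (fun q => q.2)).foldl max p.2
    let out' := ((p :: t).filter (fun q => q.2 == top)).foldl
      (fun d q => d.insert (q.1 + 1) rank) out
    pvBLoop ((p :: t).filter (fun q => q.2 != top)) out' (rank + 1)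
termination_by l _ _ => l.length
decreasing_by rw [List.attach_map_val]; simpa using pvFilterNeLt p t

def range_sort_alt (dict : List (Int × Int)) : List (Int × Int) :=
  (pvBLoop dict PySem.Dict.empty 1).items

-- ===== PRECONDITION & SPEC =====
-- Pre_ requires pairwise-distinct keys: the parameter is a Python dict, whose items always
-- have distinct keys, so this excludes only association lists that represent no dict input.
def Pre_range_sort (dict : List (Int × Int)) : Prop := (dict.map Prod.fst).Nodup
instance (dict : List (Int × Int)) : Decidable (Pre_range_sort dict) := by
  unfold Pre_range_sort; infer_instance
def pvWitness_range_sort : (List (Int × Int)) := ([(1, 5), (2, 3), (3, 5)])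
def Spec_range_sort (dict : List (Int × Int)) (out : List (Int × Int)) : Prop := out = range_sort_alt dict
instance (dict : List (Int × Int)) (out : List (Int × Int)) : Decidable (Spec_range_sort dict out) := by unfold Spec_range_sort; infer_instance

-- ===== CLAIM (what is proved, stated in full; the proofs are below) =====
def Claim_equal_range_sort : Prop := ∀ (dict : List (Int × Int)), Dom_range_sort dict → Pre_range_sort dict → Spec_range_sort dict (range_sort dict)

-- ===== LEMMAS AND PROOFS =====

-- first-occurrence deduplication of the value list (proof vocabulary only)
def pvGo : List Int → List Int → List Int
  | [], _ => []
  | a :: t, s => if a ∈ s then pvGo t (a :: s) else a :: pvGo t (a :: s)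

def pvDvals (l : List Int) : List Int := pvGo l []

-- the reference group decomposition: peel off the max-value group, then recurse
def pvG : List (Int × Int) → Int → List (Int × Int)
  | [], _ => []
  | p :: t, i =>
    let top := (t.map (fun q => q.2)).foldl max p.2
    ((p :: t).filter (fun q => q.2 == top)).map (fun q => (q.1 + 1, i))
      ++ pvG ((p :: t).filter (fun q => q.2 != top)) (i + 1)
termination_by l _ => l.length
decreasing_by rw [List.attach_map_val]; simpa using pvFilterNeLt p t

theorem pvGo_congr (l s s' : List Int) (h : ∀ x ∈ l, (x ∈ s ↔ x ∈ s')) :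
    pvGo l s = pvGo l s' := by
  induction l generalizing s s' with
  | nil => rfl
  | cons a t ih =>
    have ha := h a (by simp)
    have ht : ∀ x ∈ t, (x ∈ a :: s ↔ x ∈ a :: s') := by
      intro x hx; simp [h x (by simp [hx])]
    by_cases has : a ∈ s
    · simp [pvGo, has, ha.mp has, ih _ _ ht]
    · have has' : a ∉ s' := fun h' => has (ha.mpr h')
      simp [pvGo, has, has', ih _ _ ht]

theorem pvGo_append (l1 l2 s : List Int) :
    pvGo (l1 ++ l2) s = pvGo l1 s ++ pvGo l2 (l1.reverse ++ s) := by
  induction l1 generalizing s with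
  | nil => simp [pvGo]
  | cons a t ih =>
    have hrev : t.reverse ++ (a :: s) = (a :: t).reverse ++ s := by simp
    by_cases has : a ∈ s
    · simp only [List.cons_append, pvGo, has, if_pos, ih, hrev]
    · simp only [List.cons_append, pvGo, has, if_neg, not_false_iff, ih, hrev]

theorem pvGo_nil_of_subset (l s : List Int) (h : ∀ x ∈ l, x ∈ s) : pvGo l s = [] := by
  induction l generalizing s with
  | nil => rfl
  | cons a t ih =>
    have := h a (by simp)
    simp only [pvGo, this, if_pos]
    exact ih _ (fun x hx => by simp [h x (by simp [hx])])

theorem mem_pvGo (l s : List Int) (v : Int) : v ∈ pvGo l s ↔ v ∈ l ∧ v ∉ s := by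
  induction l generalizing s with
  | nil => simp [pvGo]
  | cons a t ih =>
    rcases eq_or_ne v a with rfl | hva
    · by_cases hvs : v ∈ s
      · have : v ∉ pvGo t (v :: s) := fun h => ((ih _).mp h).2 (by simp)
        simp [pvGo, hvs, this]
      · simp [pvGo, hvs, ih]
    · by_cases has : a ∈ s <;> simp [pvGo, has, hva, ih, List.mem_cons]

theorem mem_pvDvals (l : List Int) (v : Int) : v ∈ pvDvals l ↔ v ∈ l := by
  simp [pvDvals, mem_pvGo]

-- distinct values of a max-group prefix followed by the remainder
theorem pvDvals_group (A B : List Int) (m : Int) (hA : A ≠ []) (hAm : ∀ x ∈ A, x = m)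
    (hBm : ∀ x ∈ B, x ≠ m) : pvDvals (A ++ B) = m :: pvDvals B := by
  obtain ⟨a, A', rfl⟩ := List.exists_cons_of_ne_nil hA
  have ham : a = m := hAm a (by simp)
  subst ham
  unfold pvDvals
  rw [List.cons_append,
    show pvGo (a :: (A' ++ B)) [] = a :: pvGo (A' ++ B) [a] from by simp [pvGo],
    pvGo_append]
  have h1 : pvGo A' [a] = [] :=
    pvGo_nil_of_subset _ _ (fun x hx => by simp [hAm x (List.mem_cons_of_mem _ hx)])
  have h2 : pvGo B (A'.reverse ++ [a]) = pvGo B [] := by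
    apply pvGo_congr
    intro x hx
    have hxm := hBm x hx
    simp only [List.mem_append, List.mem_reverse, List.mem_singleton, List.not_mem_nil, iff_false]
    rintro (hxr | rfl)
    · exact hxm (hAm x (List.mem_cons_of_mem _ hxr))
    · exact hxm rfl
  rw [h1, h2]
  simp

theorem pvFoldInsert {α : Type} (l : List (Int × α)) (d : PySem.Dict Int α)
    (hf : ∀ p ∈ l, d.contains p.1 = false) (hn : (l.map Prod.fst).Nodup) :
    (l.foldl (fun d kv => d.insert kv.1 kv.2) d).items = d.items ++ l := by
  induction l generalizing d with
  | nil => simp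
  | cons p t ih =>
    have hp : d.contains p.1 = false := hf p (by simp)
    have hins : (d.insert p.1 p.2) = PySem.Dict.mk (d.items ++ [p]) := by
      simp [PySem.Dict.insert, hp]
    have hn' := List.nodup_cons.mp (by simpa using hn : (p.1 :: t.map Prod.fst).Nodup)
    have hfst : p.1 ∉ t.map Prod.fst := hn'.1
    have hf' : ∀ q ∈ t, (d.insert p.1 p.2).contains q.1 = false := by
      intro q hq
      have hqd : d.contains q.1 = false := hf q (by simp [hq])
      have hqp : q.1 ≠ p.1 := by
        intro h; exact hfst (h ▸ List.mem_map_of_mem hq)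
      rw [hins]
      simp only [PySem.Dict.contains, PySem.Dict.items, List.any_append] at hqd ⊢
      simp [hqd]
      exact fun h => hqp h.symm
    rw [List.foldl_cons, ih _ hf' hn'.2, hins]
    simp

theorem any_key_map {α : Type} (vs : List Int) (g : Int → α) (x : Int) :
    ((vs.map (fun u => (u, g u))).any (fun p => p.1 == x)) = true ↔ x ∈ vs := by
  simp [List.any_eq_true]

theorem find?_keyed {α : Type} (vs : List Int) (g : Int → α) (v : Int) (h : v ∈ vs) :
    (vs.map (fun u => (u, g u))).find? (fun p => p.1 == v) = some (v, g v) := by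
  induction vs with
  | nil => cases h
  | cons u t ih =>
    by_cases hu : u = v
    · subst hu; simp [List.find?]
    · have hvt : v ∈ t := by rcases List.mem_cons.mp h with h' | h' <;> [exact absurd h'.symm hu; exact h']
      have hb : (u == v) = false := by simp [hu]
      simp only [List.map_cons, List.find?_cons]
      simp [hb, ih hvt]

theorem out_items (m : List (Int × Int)) :
    (m.foldl (fun o kv => o.modify kv.2 [] (fun l => l ++ [kv.1]))
        (PySem.Dict.empty : PySem.Dict Int (List Int))).items
    = (pvDvals (m.map (fun p => p.2))).map
        (fun v => (v, ((m.filter (fun p => p.2 == v)).map Prod.fst))) := by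
  induction m using List.reverseRecOn with
  | nil => simp [pvDvals, pvGo, PySem.Dict.empty]
  | append_singleton m x ih =>
    obtain ⟨k, v⟩ := x
    rw [List.foldl_append, List.foldl_cons, List.foldl_nil]
    have hmv : (m ++ [(k, v)]).map (fun p => p.2) = m.map (fun p => p.2) ++ [v] := by simp
    rw [hmv, show pvDvals (m.map (fun p => p.2) ++ [v])
        = if v ∈ m.map (fun p => p.2) then pvDvals (m.map (fun p => p.2))
          else pvDvals (m.map (fun p => p.2)) ++ [v] from by
      unfold pvDvals
      rw [pvGo_append]
      by_cases hv : v ∈ m.map (fun p => p.2) <;> simp [pvGo, hv]]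
    set D := m.foldl (fun o kv => o.modify kv.2 [] (fun l => l ++ [kv.1]))
        (PySem.Dict.empty : PySem.Dict Int (List Int)) with hD
    have hcont : D.contains v = true ↔ v ∈ m.map (fun p => p.2) := by
      rw [PySem.Dict.contains, ih, any_key_map, mem_pvDvals]
    by_cases hv : v ∈ m.map (fun p => p.2)
    · -- v already has a group: the stored list gets k appended in place
      have hc : D.contains v = true := hcont.mpr hv
      have hget : D.getD v [] = (m.filter (fun p => p.2 == v)).map Prod.fst := by
        rw [PySem.Dict.getD, PySem.Dict.get?, ih,
          find?_keyed _ _ v ((mem_pvDvals _ _).mpr hv)]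
        rfl
      rw [if_pos hv]
      simp only [PySem.Dict.modify, PySem.Dict.insert, hc, if_pos, hget, ih, List.map_map]
      apply List.map_congr_left
      intro u hu
      by_cases huv : u = v
      · subst huv
        simp [List.filter_append, List.filter_cons]
      · simp [Function.comp, huv, List.filter_append, List.filter_cons, Ne.symm huv]
    · -- fresh value: a new group [(v, [k])] is appended at the end
      have hc : D.contains v = false := by
        cases h' : D.contains v
        · rfl
        · exact absurd (hcont.mp h') hv
      have hfind : D.items.find? (fun p => p.1 == v) = none := by
        rw [ih, List.find?_eq_none]
        intro p hp
        obtain ⟨u, hu, rfl⟩ := List.mem_map.mp hp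
        have : u ∈ m.map (fun p => p.2) := (mem_pvDvals _ _).mp hu
        simp only [beq_iff_eq]
        exact fun h' => hv (h' ▸ this)
      have hget : D.getD v [] = [] := by
        rw [PySem.Dict.getD, PySem.Dict.get?, hfind]; rfl
      have hfilm : m.filter (fun p => p.2 == v) = [] := by
        rw [List.filter_eq_nil_iff]
        intro p hp
        simp only [beq_iff_eq]
        exact fun h' => hv (h' ▸ List.mem_map_of_mem hp)
      rw [if_neg hv]
      simp only [PySem.Dict.modify, PySem.Dict.insert, hc, Bool.false_eq_true, if_neg,
        not_false_iff, hget, ih, List.map_append]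
      congr 1
      · apply List.map_congr_left
        intro u hu
        have humem : u ∈ m.map (fun p => p.2) := (mem_pvDvals _ _).mp hu
        have huv : u ≠ v := fun h' => hv (h' ▸ humem)
        simp [List.filter_append, List.filter_cons, Ne.symm huv]
      · simp [hfilm]

theorem rest_ne (t : List (Int × Int)) (v0 : Int)
    (ht : t.Pairwise (fun a b => b.2 ≤ a.2)) (hall : ∀ b ∈ t, b.2 ≤ v0) :
    ∀ p ∈ t.dropWhile (fun p => p.2 == v0), p.2 ≠ v0 := by
  induction t with
  | nil => simp
  | cons a t ih =>
    obtain ⟨ha1, ha2⟩ := List.pairwise_cons.mp ht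
    by_cases ha : (a.2 == v0) = true
    · simp only [List.dropWhile_cons, ha, if_pos]
      exact ih ha2 (fun b hb => hall b (by simp [hb]))
    · simp only [List.dropWhile_cons, ha, if_neg, not_false_iff]
      have hav : a.2 ≠ v0 := by simpa using ha
      have halt : a.2 < v0 := lt_of_le_of_ne (hall a (by simp)) hav
      intro p hp
      rcases List.mem_cons.mp hp with rfl | hp'
      · exact hav
      · have := ha1 p hp'
        omega

theorem stage3 (m : List (Int × Int)) (d : PySem.Dict Int Int) (i : Int)
    (hg : m.Pairwise (fun a b => b.2 ≤ a.2)) (hk : (m.map Prod.fst).Nodup)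
    (hd : ∀ p ∈ m, d.contains p.1 = false) :
    (((pvDvals (m.map (fun p => p.2))).map
        (fun v => (v, ((m.filter (fun p => p.2 == v)).map Prod.fst)))).foldl
      (fun (acc : PySem.Dict Int Int × Int) g =>
        (g.2.foldl (fun dd vv => dd.insert vv acc.2) acc.1, acc.2 + 1)) (d, i)).1.items
    = d.items ++ m.map (fun p => (p.1, i + (((pvDvals (m.map (fun q => q.2))).idxOf p.2 : Int)))) := by
  suffices H : ∀ (n : ℕ) (m : List (Int × Int)), m.length ≤ n →
      ∀ (d : PySem.Dict Int Int) (i : Int),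
      m.Pairwise (fun a b => b.2 ≤ a.2) → (m.map Prod.fst).Nodup →
      (∀ p ∈ m, d.contains p.1 = false) →
      (((pvDvals (m.map (fun p => p.2))).map
          (fun v => (v, ((m.filter (fun p => p.2 == v)).map Prod.fst)))).foldl
        (fun (acc : PySem.Dict Int Int × Int) g =>
          (g.2.foldl (fun dd vv => dd.insert vv acc.2) acc.1, acc.2 + 1)) (d, i)).1.items
      = d.items ++ m.map (fun p => (p.1, i + (((pvDvals (m.map (fun q => q.2))).idxOf p.2 : Int)))) by
    exact H m.length m le_rfl d i hg hk hd
  intro n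
  induction n with
  | zero =>
    intro m hm d i _ _ _
    rw [List.length_eq_zero_iff.mp (Nat.le_zero.mp hm)]
    simp [pvDvals, pvGo]
  | succ n ihn =>
    rintro (_ | ⟨⟨k0, v0⟩, t⟩) hm d i hg hk hd
    · simp [pvDvals, pvGo]
    · -- split off the first run of the top value v0
      set run' := t.takeWhile (fun p => p.2 == v0) with hrun'
      set rest := t.dropWhile (fun p => p.2 == v0) with hrest
      set run : List (Int × Int) := (k0, v0) :: run' with hrun
      have htr : run' ++ rest = t := List.takeWhile_append_dropWhile
      have hm' : (k0, v0) :: t = run ++ rest := by rw [hrun, List.cons_append, htr]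
      obtain ⟨hall, ht⟩ := List.pairwise_cons.mp hg
      have f_run : ∀ p ∈ run, p.2 = v0 := by
        intro p hp
        rcases List.mem_cons.mp hp with rfl | hp'
        · rfl
        · simpa using List.mem_takeWhile_imp hp'
      have f_rest : ∀ p ∈ rest, p.2 ≠ v0 := rest_ne t v0 ht hall
      have hrest_pw : rest.Pairwise (fun a b => b.2 ≤ a.2) :=
        List.Pairwise.sublist (List.dropWhile_sublist _) ht
      have hkeys : (run.map Prod.fst ++ rest.map Prod.fst).Nodup := by
        rw [← List.map_append, ← hm']; exact hk
      obtain ⟨hkrun, hkrest, hkdisj⟩ := List.nodup_append.mp hkeys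
      -- the distinct values of m are v0 followed by the distinct values of rest
      have hdv : pvDvals (((k0, v0) :: t).map (fun p => p.2))
          = v0 :: pvDvals (rest.map (fun p => p.2)) := by
        rw [hm', List.map_append]
        exact pvDvals_group _ _ v0 (by simp [hrun])
          (fun x hx => by obtain ⟨p, hp, rfl⟩ := List.mem_map.mp hx; exact f_run p hp)
          (fun x hx => by obtain ⟨p, hp, rfl⟩ := List.mem_map.mp hx; exact f_rest p hp)
      -- the group list decomposes as head (v0, keys of run) and the groups of rest
      have hfilter0 : ((k0, v0) :: t).filter (fun p => p.2 == v0) = run := by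
        rw [hm', List.filter_append]
        rw [List.filter_eq_self.mpr (fun p hp => by simp [f_run p hp]),
          List.filter_eq_nil_iff.mpr (fun p hp => by simp [f_rest p hp])]
        simp
      have hfilterv : ∀ v ∈ pvDvals (rest.map (fun p => p.2)),
          ((k0, v0) :: t).filter (fun p => p.2 == v) = rest.filter (fun p => p.2 == v) := by
        intro v hv
        obtain ⟨p, hp, rfl⟩ := List.mem_map.mp ((mem_pvDvals _ _).mp hv)
        have hvne : p.2 ≠ v0 := f_rest p hp
        rw [hm', List.filter_append, List.filter_eq_nil_iff.mpr
          (fun q hq => by simp only [f_run q hq, beq_iff_eq]; exact fun h => hvne h.symm)]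
        simp
      have hG : (pvDvals (((k0, v0) :: t).map (fun p => p.2))).map
            (fun v => (v, ((((k0, v0) :: t).filter (fun p => p.2 == v)).map Prod.fst)))
          = (v0, run.map Prod.fst) :: (pvDvals (rest.map (fun p => p.2))).map
            (fun v => (v, ((rest.filter (fun p => p.2 == v)).map Prod.fst))) := by
        rw [hdv, List.map_cons, hfilter0]
        congr 1
        apply List.map_congr_left
        intro v hv
        rw [hfilterv v hv]
      rw [hG, List.foldl_cons]
      -- the inner fold inserts the run keys, all fresh, with rank i
      have h1 : (run.map Prod.fst).foldl (fun dd vv => dd.insert vv i) d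
          = (run.map (fun p => (p.1, i))).foldl (fun dd kv => dd.insert kv.1 kv.2) d := by
        rw [List.foldl_map, List.foldl_map]
      have hrunfresh : ∀ q ∈ run.map (fun p => (p.1, i)), d.contains q.1 = false := by
        intro q hq
        obtain ⟨p, hp, rfl⟩ := List.mem_map.mp hq
        exact hd p (by rw [hm']; exact List.mem_append_left _ hp)
      have hrunnodup : ((run.map (fun p => (p.1, i))).map Prod.fst).Nodup := by
        rw [List.map_map]
        exact hkrun
      have hitems : ((run.map Prod.fst).foldl (fun dd vv => dd.insert vv i) d).items
          = d.items ++ run.map (fun p => (p.1, i)) := by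
        rw [h1, pvFoldInsert _ _ hrunfresh hrunnodup]
      have hd' : ∀ p ∈ rest,
          ((run.map Prod.fst).foldl (fun dd vv => dd.insert vv i) d).contains p.1 = false := by
        intro p hp
        rw [PySem.Dict.contains, hitems, List.any_append]
        have hda : (d.items.any fun q => q.1 == p.1) = false := hd p (by rw [hm']; exact List.mem_append_right _ hp)
        have hrb : ((run.map (fun p => (p.1, i))).any fun q => q.1 == p.1) = false := by
          rw [List.any_eq_false]
          intro q hq
          obtain ⟨r, hr, rfl⟩ := List.mem_map.mp hq
          simp only [beq_iff_eq]
          exact hkdisj r.1 (List.mem_map_of_mem hr) p.1 (List.mem_map_of_mem hp)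
        rw [hda, hrb]
        rfl
      have hlen : rest.length ≤ n := by
        have hle := (List.dropWhile_sublist (l := t) (fun p => p.2 == v0)).length_le
        rw [← hrest] at hle
        simp only [List.length_cons] at hm
        omega
      rw [ihn rest hlen _ (i + 1) hrest_pw hkrest hd']
      rw [hitems, hdv]
      -- reassemble: run gets rank i, each rest element one more than its rank within rest
      rw [show ((k0, v0) :: t).map
            (fun p => (p.1, i + (((v0 :: pvDvals (rest.map (fun q => q.2))).idxOf p.2 : Int))))
          = run.map (fun p => (p.1, i)) ++ rest.map
            (fun p => (p.1, i + 1 + (((pvDvals (rest.map (fun q => q.2))).idxOf p.2 : Int)))) from by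
        rw [hm', List.map_append]
        congr 1
        · apply List.map_congr_left
          intro p hp
          rw [f_run p hp, List.idxOf_cons_self]
          simp
        · apply List.map_congr_left
          intro p hp
          rw [List.idxOf_cons_ne _ (Ne.symm (f_rest p hp))]
          simp only [Prod.mk.injEq, true_and, Nat.succ_eq_add_one]
          push_cast
          ring]
      rw [List.append_assoc]

-- ===== stable-sort plumbing for B =====

-- insertBy puts x in front of a list all of whose keys are strictly below key x
theorem insertBy_all_lt {α : Type} (key : α → Int) (x : α) (L : List α)
    (h : ∀ z ∈ L, key z < key x) :
    PySem.List.insertBy (fun a b => decide (key b < key a)) x L = x :: L := by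
  cases L with
  | nil => rfl
  | cons z zs => simp [PySem.List.insertBy, h z (by simp)]

-- insertBy preserves descending order
theorem insertBy_pairwise {α : Type} (key : α → Int) (x : α) (acc : List α)
    (hs : acc.Pairwise (fun a b => key b ≤ key a)) :
    (PySem.List.insertBy (fun a b => decide (key b < key a)) x acc).Pairwise
      (fun a b => key b ≤ key a) := by
  induction acc with
  | nil => simp [PySem.List.insertBy]
  | cons y ys ih =>
    obtain ⟨hy, hys⟩ := List.pairwise_cons.mp hs
    by_cases hb : key y < key x
    · simp only [PySem.List.insertBy, hb, decide_true, if_pos]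
      refine List.pairwise_cons.mpr ⟨?_, hs⟩
      intro z hz
      rcases List.mem_cons.mp hz with rfl | hz'
      · exact le_of_lt hb
      · exact le_trans (hy z hz') (le_of_lt hb)
    · simp only [PySem.List.insertBy, hb, decide_false, Bool.false_eq_true, if_neg,
        not_false_iff]
      refine List.pairwise_cons.mpr ⟨?_, ih hys⟩
      intro z hz
      rcases (PySem.List.mem_insertBy _ _ _ _).mp hz with rfl | hz'
      · exact le_of_not_gt hb
      · exact hy z hz'

-- filter commutes with one stable insertion into a descending list
theorem filter_insertBy {α : Type} (key : α → Int) (pr : α → Bool) (x : α) (acc : List α)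
    (hs : acc.Pairwise (fun a b => key b ≤ key a)) :
    (PySem.List.insertBy (fun a b => decide (key b < key a)) x acc).filter pr
      = if pr x then PySem.List.insertBy (fun a b => decide (key b < key a)) x (acc.filter pr)
        else acc.filter pr := by
  induction acc with
  | nil => cases hx : pr x <;> simp [PySem.List.insertBy, hx]
  | cons y ys ih =>
    obtain ⟨hy, hys⟩ := List.pairwise_cons.mp hs
    by_cases hb : key y < key x
    · simp only [PySem.List.insertBy, hb, decide_true, if_pos]
      have hlt : ∀ z ∈ (y :: ys).filter pr, key z < key x := by
        intro z hz
        have hz' := List.mem_of_mem_filter hz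
        rcases List.mem_cons.mp hz' with rfl | hz''
        · exact hb
        · exact lt_of_le_of_lt (hy z hz'') hb
      cases hx : pr x
      · simp [List.filter_cons, hx]
      · rw [insertBy_all_lt key x _ hlt]
        simp [List.filter_cons, hx]
    · simp only [PySem.List.insertBy, hb, decide_false, Bool.false_eq_true, if_neg,
        not_false_iff]
      cases hx : pr x
      · cases hyp : pr y <;>
          simp [List.filter_cons, hyp, hx, ih hys]
      · cases hyp : pr y
        · simp [List.filter_cons, hyp, hx, ih hys]
        · have hnb : ¬ key y < key x := hb
          simp only [List.filter_cons, hyp, if_pos, hx, ih hys]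
          rw [show (y :: ys.filter pr) = y :: ys.filter pr from rfl]
          simp [PySem.List.insertBy, hnb, hx]

-- stable sort commutes with filter
theorem sorted_filter {α : Type} (key : α → Int) (pr : α → Bool) (l : List α) :
    (PySem.List.sorted l key true).filter pr = PySem.List.sorted (l.filter pr) key true := by
  rw [PySem.List.sorted_rev_eq_foldl_insertBy, PySem.List.sorted_rev_eq_foldl_insertBy]
  suffices H : ∀ (acc : List α), acc.Pairwise (fun a b => key b ≤ key a) →
      (l.foldl (fun acc x => PySem.List.insertBy (fun a b => decide (key b < key a)) x acc) acc).filter pr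
      = (l.filter pr).foldl (fun acc x => PySem.List.insertBy (fun a b => decide (key b < key a)) x acc) (acc.filter pr) by
    simpa using H [] (by simp)
  induction l with
  | nil => intro acc _; rfl
  | cons x t ih =>
    intro acc hacc
    rw [List.foldl_cons, ih _ (insertBy_pairwise key x acc hacc), filter_insertBy key pr x acc hacc]
    cases hx : pr x
    · simp [List.filter_cons, hx]
    · simp [List.filter_cons, hx]

-- a descending list bounded by m splits into its m-part followed by its non-m part
theorem split_desc (s : List (Int × Int)) (m : Int)
    (hs : s.Pairwise (fun a b => b.2 ≤ a.2)) (hm : ∀ q ∈ s, q.2 ≤ m) :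
    s = s.filter (fun q => q.2 == m) ++ s.filter (fun q => q.2 != m) := by
  induction s with
  | nil => rfl
  | cons q t ih =>
    obtain ⟨hq, ht⟩ := List.pairwise_cons.mp hs
    by_cases hqm : q.2 = m
    · simp only [List.filter_cons, hqm, beq_self_eq_true, if_pos, bne_self_eq_false,
        Bool.false_eq_true, if_neg, not_false_iff, List.cons_append]
      exact congrArg (q :: ·) (ih ht (fun r hr => hm r (by simp [hr])))
    · have hqlt : q.2 < m := lt_of_le_of_ne (hm q (by simp)) hqm
      have htm : ∀ r ∈ t, r.2 ≠ m := by
        intro r hr h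
        have := hq r hr
        omega
      have h1 : (q :: t).filter (fun q => q.2 == m) = [] := by
        rw [List.filter_eq_nil_iff]
        intro r hr
        rcases List.mem_cons.mp hr with rfl | hr'
        · simp [hqm]
        · simp [htm r hr']
      have h2 : (q :: t).filter (fun q => q.2 != m) = q :: t := by
        rw [List.filter_eq_self]
        intro r hr
        rcases List.mem_cons.mp hr with rfl | hr'
        · simp [hqm]
        · simp [htm r hr']
      rw [h1, h2, List.nil_append]

-- the A-side normal form equals the selection recursion pvG
theorem main_form (l : List (Int × Int)) (i : Int) :
    (PySem.List.sorted l (fun kv => kv.2) true).map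
      (fun kv => (kv.1 + 1, i + (((pvDvals ((PySem.List.sorted l (fun kv => kv.2) true).map (fun q => q.2))).idxOf kv.2 : Int))))
    = pvG l i := by
  suffices H : ∀ (n : ℕ) (l : List (Int × Int)), l.length ≤ n → ∀ (i : Int),
      (PySem.List.sorted l (fun kv => kv.2) true).map
        (fun kv => (kv.1 + 1, i + (((pvDvals ((PySem.List.sorted l (fun kv => kv.2) true).map (fun q => q.2))).idxOf kv.2 : Int))))
      = pvG l i by
    exact H l.length l le_rfl i
  intro n
  induction n with
  | zero =>
    intro l hl i
    rw [List.length_eq_zero_iff.mp (Nat.le_zero.mp hl)]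
    simp [pvG, PySem.List.sorted]
  | succ n ihn =>
    rintro (_ | ⟨p, t⟩) hl i
    · simp [pvG, PySem.List.sorted]
    · set m := (t.map (fun q => q.2)).foldl max p.2 with hm
      have hle : ∀ q ∈ p :: t, q.2 ≤ m := by
        intro q hq
        rcases List.mem_cons.mp hq with rfl | hq'
        · exact (PySem.List.le_foldl_max _ _).1
        · exact (PySem.List.le_foldl_max _ _).2 q.2 (List.mem_map_of_mem hq')
      set run := (p :: t).filter (fun q => q.2 == m) with hrunDef
      set rest := (p :: t).filter (fun q => q.2 != m) with hrestDef
      set s := PySem.List.sorted (p :: t) (fun kv => kv.2) true with hsDef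
      set s' := PySem.List.sorted rest (fun kv => kv.2) true with hs'Def
      have hspw : s.Pairwise (fun a b => b.2 ≤ a.2) :=
        PySem.List.sorted_pairwise_rev (p :: t) (fun kv => kv.2)
      have hsle : ∀ q ∈ s, q.2 ≤ m := by
        intro q hq
        exact hle q ((PySem.List.mem_sorted _ _ _ _).mp hq)
      have hrun_const : ∀ q ∈ run, q.2 = m := by
        intro q hq
        have := List.of_mem_filter hq
        simpa using this
      have hrest_ne : ∀ q ∈ rest, q.2 ≠ m := by
        intro q hq
        have := List.of_mem_filter hq
        simpa using this
      -- decompose the sorted list into the max group (in input order) and the sorted rest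
      have hsplit : s = run ++ s' := by
        rw [hsDef, split_desc (PySem.List.sorted (p :: t) (fun kv => kv.2) true) m hspw hsle]
        congr 1
        · rw [sorted_filter (fun kv => kv.2) (fun q => q.2 == m) (p :: t), ← hrunDef,
            PySem.List.sorted_rev_eq_self_of_pairwise]
          exact List.pairwise_of_forall_mem_list
            (fun a ha b hb => by rw [hrun_const a ha, hrun_const b hb])
        · rw [sorted_filter (fun kv => kv.2) (fun q => q.2 != m) (p :: t)]
      have hrun_ne : run ≠ [] := by
        have : ∃ q ∈ p :: t, q.2 = m := by
          rcases PySem.List.foldl_max_mem (t.map (fun q => q.2)) p.2 with h | h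
          · exact ⟨p, by simp, h.symm⟩
          · obtain ⟨q, hq, hqe⟩ := List.mem_map.mp h
            exact ⟨q, by simp [hq], hqe⟩
        obtain ⟨q, hq, hqe⟩ := this
        exact List.ne_nil_of_mem (List.mem_filter.mpr ⟨hq, by simp [hqe]⟩)
      have hs'_ne : ∀ q ∈ s', q.2 ≠ m := by
        intro q hq
        exact hrest_ne q ((PySem.List.mem_sorted _ _ _ _).mp hq)
      have hdv : pvDvals (s.map (fun q => q.2)) = m :: pvDvals (s'.map (fun q => q.2)) := by
        rw [hsplit, List.map_append]
        exact pvDvals_group _ _ m (by simpa using hrun_ne)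
          (fun x hx => by obtain ⟨q, hq, rfl⟩ := List.mem_map.mp hx; exact hrun_const q hq)
          (fun x hx => by obtain ⟨q, hq, rfl⟩ := List.mem_map.mp hx; exact hs'_ne q hq)
      have hlen : rest.length ≤ n := by
        have := pvFilterNeLt p t
        rw [← hm, ← hrestDef] at this
        simp only [List.length_cons] at this hl
        omega
      have hIH := ihn rest hlen (i + 1)
      rw [← hs'Def] at hIH
      rw [hdv, hsplit, List.map_append]
      have hrunmap : run.map (fun kv =>
            (kv.1 + 1, i + (((m :: pvDvals (s'.map (fun q => q.2))).idxOf kv.2 : Int))))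
          = run.map (fun q => (q.1 + 1, i)) := by
        apply List.map_congr_left
        intro q hq
        rw [hrun_const q hq, List.idxOf_cons_self]
        simp
      have hs'map : s'.map (fun kv =>
            (kv.1 + 1, i + (((m :: pvDvals (s'.map (fun q => q.2))).idxOf kv.2 : Int))))
          = pvG rest (i + 1) := by
        rw [← hIH]
        apply List.map_congr_left
        intro q hq
        rw [List.idxOf_cons_ne _ (Ne.symm (hs'_ne q hq))]
        simp only [Prod.mk.injEq, true_and, Nat.succ_eq_add_one]
        push_cast
        ring
      rw [hrunmap, hs'map]
      conv_rhs => rw [pvG]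

-- B's loop inserts exactly the pvG pairs
theorem bloop_items (l : List (Int × Int)) (d : PySem.Dict Int Int) (rank : Int)
    (hk : (l.map Prod.fst).Nodup)
    (hd : ∀ q ∈ l, d.contains (q.1 + 1) = false) :
    (pvBLoop l d rank).items = d.items ++ pvG l rank := by
  suffices H : ∀ (n : ℕ) (l : List (Int × Int)), l.length ≤ n →
      ∀ (d : PySem.Dict Int Int) (rank : Int),
      (l.map Prod.fst).Nodup → (∀ q ∈ l, d.contains (q.1 + 1) = false) →
      (pvBLoop l d rank).items = d.items ++ pvG l rank by
    exact H l.length l le_rfl d rank hk hd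
  intro n
  induction n with
  | zero =>
    intro l hl d rank _ _
    rw [List.length_eq_zero_iff.mp (Nat.le_zero.mp hl)]
    simp [pvBLoop, pvG]
  | succ n ihn =>
    rintro (_ | ⟨p, t⟩) hl d rank hk hd
    · simp [pvBLoop, pvG]
    · rw [pvBLoop, pvG]
      set m := (t.map (fun q => q.2)).foldl max p.2 with hm
      set run := (p :: t).filter (fun q => q.2 == m) with hrunDef
      set rest := (p :: t).filter (fun q => q.2 != m) with hrestDef
      have hrun_sub : ∀ q ∈ run, q ∈ p :: t := fun q hq => List.mem_of_mem_filter hq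
      have hrest_sub : ∀ q ∈ rest, q ∈ p :: t := fun q hq => List.mem_of_mem_filter hq
      have hinj : ∀ q ∈ p :: t, ∀ r ∈ p :: t, q.1 = r.1 → q = r :=
        fun q hq r hr h => List.inj_on_of_nodup_map hk hq hr h
      -- the update over the max group is a fold of fresh inserts
      have hfold : run.foldl (fun d q => d.insert (q.1 + 1) rank) d
          = (run.map (fun q => (q.1 + 1, rank))).foldl (fun d kv => d.insert kv.1 kv.2) d := by
        rw [List.foldl_map]
      have hrunkeys : ((run.map (fun q => (q.1 + 1, rank))).map Prod.fst).Nodup := by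
        rw [List.map_map]
        have h1 : (run.map Prod.fst).Nodup :=
          ((List.filter_sublist).map Prod.fst).nodup hk
        rw [show (Prod.fst ∘ fun q : Int × Int => (q.1 + 1, rank))
            = ((fun x : Int => x + 1) ∘ Prod.fst) from rfl, ← List.map_map]
        exact h1.map (add_left_injective 1)
      have hrunfresh : ∀ q ∈ run.map (fun q => (q.1 + 1, rank)), d.contains q.1 = false := by
        intro q hq
        obtain ⟨r, hr, rfl⟩ := List.mem_map.mp hq
        exact hd r (hrun_sub r hr)
      have hitems : (run.foldl (fun d q => d.insert (q.1 + 1) rank) d).items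
          = d.items ++ run.map (fun q => (q.1 + 1, rank)) := by
        rw [hfold, pvFoldInsert _ _ hrunfresh hrunkeys]
      have hrestkeys : (rest.map Prod.fst).Nodup :=
        ((List.filter_sublist).map Prod.fst).nodup hk
      have hrestfresh : ∀ q ∈ rest,
          (run.foldl (fun d q => d.insert (q.1 + 1) rank) d).contains (q.1 + 1) = false := by
        intro q hq
        rw [PySem.Dict.contains, hitems, List.any_append]
        have hda : (d.items.any fun r => r.1 == q.1 + 1) = false := hd q (hrest_sub q hq)
        have hrb : ((run.map (fun q => (q.1 + 1, rank))).any fun r => r.1 == q.1 + 1) = false := by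
          rw [List.any_eq_false]
          intro r hr
          obtain ⟨u, hu, rfl⟩ := List.mem_map.mp hr
          simp only [beq_iff_eq]
          intro h
          have huq : u = q := hinj u (hrun_sub u hu) q (hrest_sub q hq) (by omega)
          have h1 : (u.2 == m) = true := by
            rw [hrunDef] at hu; exact List.of_mem_filter (p := fun q : Int × Int => q.2 == m) hu
          have h2 : (q.2 != m) = true := by
            rw [hrestDef] at hq; exact List.of_mem_filter (p := fun q : Int × Int => q.2 != m) hq
          rw [huq] at h1
          simp at h1 h2
          exact h2 h1
        rw [hda, hrb]
        rfl
      have hlen : rest.length ≤ n := by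
        have := pvFilterNeLt p t
        rw [← hm, ← hrestDef] at this
        simp only [List.length_cons] at this hl
        omega
      rw [ihn rest hlen _ (rank + 1) hrestkeys hrestfresh, hitems, List.append_assoc]

-- ===== VERDICT (by name: the statement is the Claim_ definition above) =====
theorem range_sort_spec : Claim_equal_range_sort := by
  unfold Claim_equal_range_sort Pre_range_sort Spec_range_sort
  intro dict _ hpre
  simp only [range_sort, range_sort_alt]
  set s := PySem.List.sorted dict (fun item => item.2) true with hs
  have hperm : s.Perm dict := PySem.List.sorted_perm dict (fun item => item.2) true
  have hkeys : (s.map Prod.fst).Nodup := ((hperm.map Prod.fst).nodup_iff).mpr hpre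
  have hpw : s.Pairwise (fun a b => b.2 ≤ a.2) :=
    PySem.List.sorted_pairwise_rev dict (fun item => item.2)
  set m := s.map (fun kv : Int × Int => (kv.1 + 1, kv.2)) with hm
  have hmkeys : (m.map Prod.fst).Nodup := by
    rw [hm, List.map_map]
    rw [show (Prod.fst ∘ fun kv : Int × Int => (kv.1 + 1, kv.2))
        = ((fun x : Int => x + 1) ∘ Prod.fst) from rfl, ← List.map_map]
    exact hkeys.map (add_left_injective 1)
  have hmpw : m.Pairwise (fun a b => b.2 ≤ a.2) := by
    rw [hm]; exact hpw.map _ (fun a b h => h)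
  have hmv : m.map (fun p => p.2) = s.map (fun p => p.2) := by
    rw [hm, List.map_map]; rfl
  -- A, stage 1: the k+1 dict comprehension just shifts the keys
  have hA1 : (s.foldl (fun d kv => d.insert (kv.1 + 1) kv.2)
      (PySem.Dict.empty : PySem.Dict Int Int)).items = m := by
    have h := List.foldl_map (f := fun kv : Int × Int => (kv.1 + 1, kv.2))
      (g := fun (d : PySem.Dict Int Int) kv => d.insert kv.1 kv.2) (l := s)
      (init := (PySem.Dict.empty : PySem.Dict Int Int))
    try dsimp only at h
    rw [← h, ← hm, pvFoldInsert _ _ (fun p _ => PySem.Dict.contains_empty p.1) hmkeys]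
    simp [PySem.Dict.empty]
  rw [hA1, out_items m, stage3 m PySem.Dict.empty 1 hmpw hmkeys
    (fun p _ => PySem.Dict.contains_empty p.1)]
  simp only [PySem.Dict.empty, List.nil_append]
  -- A's normal form over the shifted sorted list = the same map over s
  have hAform : m.map (fun p => (p.1, 1 + (((pvDvals (m.map (fun q => q.2))).idxOf p.2 : Int))))
      = s.map (fun kv => (kv.1 + 1, 1 + (((pvDvals (s.map (fun q => q.2))).idxOf kv.2 : Int)))) := by
    rw [hmv, hm, List.map_map]
    rfl
  rw [hAform, hs, main_form dict 1]
  -- B's loop starting from the empty dict produces exactly pvG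
  have hB := bloop_items dict PySem.Dict.empty 1 hpre
    (fun q _ => PySem.Dict.contains_empty (q.1 + 1))
  simp only [PySem.Dict.empty] at hB
  rw [hB]
  simp [PySem.Dict.empty]
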